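-- pv_equiv track=rewrite | github.com/remyroche/Ares | src/training/steps/step6_analyst_enhancement.py | _categorize_features_by_tier
-- ===== SOURCE A (Python) =====
-- def _categorize_features_by_tier(feature_names: list) -> dict:
--     """Categorize features into tiers based on naming patterns."""
--     categories = {
--         "tier_1": [],  # Core features
--         "tier_2": [],  # Normalized features
--         "tier_3": [],  # Interaction features
--         "tier_4": [],  # Lagged features
--         "tier_5": [],  # Causality features
--     }
--
--     for feature in feature_names:
--         feature_lower = feature.lower()
--
--         # Tier 1: Core technical and liquidity features
--         if any(keyword in feature_lower for keyword in [
--             "rsi", "macd", "bb", "atr", "adx", "sma", "ema", "cci", "mfi", "roc",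
--             "volume", "spread", "liquidity", "price_impact", "kyle", "amihud"
--         ]):
--             categories["tier_1"].append(feature)
--
--         # Tier 2: Normalized features
--         elif any(keyword in feature_lower for keyword in [
--             "_z_score", "_change", "_pct_change", "_acceleration", "_bounded",
--             "_log", "_normalized"
--         ]):
--             categories["tier_2"].append(feature)
--
--         # Tier 3: Interaction features
--         elif "_x_" in feature_lower or "_div_" in feature_lower:
--             categories["tier_3"].append(feature)
--
--         # Tier 4: Lagged features
--         elif "_lag" in feature_lower:
--             categories["tier_4"].append(feature)
--
--         # Tier 5: Causality features
--         elif any(keyword in feature_lower for keyword in [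
--             "_predicts_", "_causality", "_divergence", "_stress", "_extreme"
--         ]):
--             categories["tier_5"].append(feature)
--
--         # Default to tier 1 for uncategorized features
--         else:
--             categories["tier_1"].append(feature)
--
--     return categories
-- ===== SOURCE B (Python) =====
-- # Table-driven re-implementation: a first-match classifier over a RULES table,
-- # with the result built as one per-tier filter pass per tier (simpler decomposition).
-- RULES = [
--     ("tier_1", ["rsi", "macd", "bb", "atr", "adx", "sma", "ema", "cci", "mfi", "roc",
--                 "volume", "spread", "liquidity", "price_impact", "kyle", "amihud"]),
--     ("tier_2", ["_z_score", "_change", "_pct_change", "_acceleration", "_bounded",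
--                 "_log", "_normalized"]),
--     ("tier_3", ["_x_", "_div_"]),
--     ("tier_4", ["_lag"]),
--     ("tier_5", ["_predicts_", "_causality", "_divergence", "_stress", "_extreme"]),
-- ]
--
--
-- def _tier_of(feature):
--     feature_lower = feature.lower()
--     for tier, keywords in RULES:
--         if any(k in feature_lower for k in keywords):
--             return tier
--     return "tier_1"
--
--
-- def _categorize_features_by_tier(feature_names: list) -> dict:
--     tiers = [_tier_of(f) for f in feature_names]
--     return {tier: [f for f, t in zip(feature_names, tiers) if t == tier]
--             for tier, _ in RULES}
-- ===== Notes on version B (the rewrite author's own statement) =====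
-- stated objective: simpler
-- what changed: Replaces the single-pass if/elif cascade appending into a mutable dict by a first-match classifier over a (tier, keywords) rules table plus one filter pass per tier building the dict by comprehension.
import Mathlib
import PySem

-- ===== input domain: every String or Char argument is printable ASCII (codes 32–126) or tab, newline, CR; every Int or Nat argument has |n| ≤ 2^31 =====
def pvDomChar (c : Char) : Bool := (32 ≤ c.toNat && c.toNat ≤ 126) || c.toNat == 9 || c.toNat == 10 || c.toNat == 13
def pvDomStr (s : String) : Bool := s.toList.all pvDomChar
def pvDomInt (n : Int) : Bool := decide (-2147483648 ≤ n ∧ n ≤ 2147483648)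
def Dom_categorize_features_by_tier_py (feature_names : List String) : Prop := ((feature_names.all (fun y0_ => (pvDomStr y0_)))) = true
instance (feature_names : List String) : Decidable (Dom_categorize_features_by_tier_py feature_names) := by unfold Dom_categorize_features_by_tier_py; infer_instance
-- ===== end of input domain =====

-- B replaces the if/elif cascade with a first-match rules-table classifier and one filter pass per tier (objective: simpler).

-- shared keyword data (pure data, used by both ports)
def pvKw1 : List String :=
  ["rsi", "macd", "bb", "atr", "adx", "sma", "ema", "cci", "mfi", "roc",
   "volume", "spread", "liquidity", "price_impact", "kyle", "amihud"]
def pvKw2 : List String :=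
  ["_z_score", "_change", "_pct_change", "_acceleration", "_bounded",
   "_log", "_normalized"]
def pvKw5 : List String :=
  ["_predicts_", "_causality", "_divergence", "_stress", "_extreme"]

-- ===== PORT A =====
-- one iteration of A's loop body: the if/elif cascade appending into the dict
def catA_step (categories : PySem.Dict String (List String)) (feature : String) :
    PySem.Dict String (List String) :=
  let feature_lower := PySem.Str.lower feature
  if pvKw1.any (fun k => PySem.Str.isIn k feature_lower) then
    categories.modify "tier_1" [] (fun l => l ++ [feature])
  else if pvKw2.any (fun k => PySem.Str.isIn k feature_lower) then
    categories.modify "tier_2" [] (fun l => l ++ [feature])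
  else if PySem.Str.isIn "_x_" feature_lower || PySem.Str.isIn "_div_" feature_lower then
    categories.modify "tier_3" [] (fun l => l ++ [feature])
  else if PySem.Str.isIn "_lag" feature_lower then
    categories.modify "tier_4" [] (fun l => l ++ [feature])
  else if pvKw5.any (fun k => PySem.Str.isIn k feature_lower) then
    categories.modify "tier_5" [] (fun l => l ++ [feature])
  else
    categories.modify "tier_1" [] (fun l => l ++ [feature])

def categorize_features_by_tier_py (feature_names : List String) : List (String × List String) :=
  (feature_names.foldl catA_step
    (PySem.Dict.ofList
      [("tier_1", []), ("tier_2", []), ("tier_3", []), ("tier_4", []), ("tier_5", [])])).items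

-- ===== PORT B =====
def tier_rules : List (String × List String) :=
  [("tier_1", pvKw1), ("tier_2", pvKw2), ("tier_3", ["_x_", "_div_"]),
   ("tier_4", ["_lag"]), ("tier_5", pvKw5)]

def tier_of (feature : String) : String :=
  let feature_lower := PySem.Str.lower feature
  match tier_rules.find? (fun r => r.2.any (fun k => PySem.Str.isIn k feature_lower)) with
  | some r => r.1
  | none => "tier_1"

def categorize_features_by_tier_py_alt (feature_names : List String) : List (String × List String) :=
  let tiers := feature_names.map tier_of
  tier_rules.map (fun r =>
    (r.1, ((feature_names.zip tiers).filter (fun p => p.2 == r.1)).map (·.1)))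

-- ===== PRECONDITION & SPEC =====
def Spec_categorize_features_by_tier_py (feature_names : List String) (out : List (String × List String)) : Prop := out = categorize_features_by_tier_py_alt feature_names
instance (feature_names : List String) (out : List (String × List String)) : Decidable (Spec_categorize_features_by_tier_py feature_names out) := by unfold Spec_categorize_features_by_tier_py; infer_instance

-- ===== CLAIM (what is proved, stated in full; the proofs are below) =====
def Claim_equal_categorize_features_by_tier_py : Prop := ∀ (feature_names : List String), Dom_categorize_features_by_tier_py feature_names → Spec_categorize_features_by_tier_py feature_names (categorize_features_by_tier_py feature_names)

-- ===== LEMMAS AND PROOFS =====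
lemma zip_map_filter_fst {α β : Type} [BEq β] (g : α → β) (c : β) (xs : List α) :
    ((xs.zip (xs.map g)).filter (fun p => p.2 == c)).map (·.1)
      = xs.filter (fun x => g x == c) := by
  induction xs with
  | nil => rfl
  | cons x xs ih =>
    simp only [List.map_cons, List.zip_cons_cons, List.filter_cons]
    by_cases h : (g x == c) = true <;> simp [h, ih]

lemma catA_fold (fs : List String) (a1 a2 a3 a4 a5 : List String) :
    fs.foldl catA_step
      (PySem.Dict.mk [("tier_1", a1), ("tier_2", a2), ("tier_3", a3), ("tier_4", a4), ("tier_5", a5)]) =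
    PySem.Dict.mk
      [("tier_1", a1 ++ fs.filter (fun f => tier_of f == "tier_1")),
       ("tier_2", a2 ++ fs.filter (fun f => tier_of f == "tier_2")),
       ("tier_3", a3 ++ fs.filter (fun f => tier_of f == "tier_3")),
       ("tier_4", a4 ++ fs.filter (fun f => tier_of f == "tier_4")),
       ("tier_5", a5 ++ fs.filter (fun f => tier_of f == "tier_5"))] := by
  induction fs generalizing a1 a2 a3 a4 a5 with
  | nil => simp
  | cons f fs ih =>
    simp only [List.foldl_cons]
    cases h1 : (pvKw1.any fun k => PySem.Chars.isIn k.toList (PySem.Chars.lower f.toList)) with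
    | true =>
      have hstep : catA_step (PySem.Dict.mk [("tier_1", a1), ("tier_2", a2), ("tier_3", a3), ("tier_4", a4), ("tier_5", a5)]) f = PySem.Dict.mk [("tier_1", a1 ++ [f]), ("tier_2", a2), ("tier_3", a3), ("tier_4", a4), ("tier_5", a5)] := by
        simp [catA_step, PySem.Dict.modify, PySem.Dict.insert, PySem.Dict.getD, PySem.Dict.get?, h1]
      have ht : tier_of f = "tier_1" := by
        simp [tier_of, tier_rules, h1]
      rw [hstep, ih]
      simp [ht]
    | false =>
      cases h2 : (pvKw2.any fun k => PySem.Chars.isIn k.toList (PySem.Chars.lower f.toList)) with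
      | true =>
        have hstep : catA_step (PySem.Dict.mk [("tier_1", a1), ("tier_2", a2), ("tier_3", a3), ("tier_4", a4), ("tier_5", a5)]) f = PySem.Dict.mk [("tier_1", a1), ("tier_2", a2 ++ [f]), ("tier_3", a3), ("tier_4", a4), ("tier_5", a5)] := by
          simp [catA_step, PySem.Dict.modify, PySem.Dict.insert, PySem.Dict.getD, PySem.Dict.get?, h1, h2]
        have ht : tier_of f = "tier_2" := by
          simp [tier_of, tier_rules, List.find?, h1, h2]
        rw [hstep, ih]
        simp [ht]
      | false =>
        cases h3 : (PySem.Chars.isIn ['_','x','_'] (PySem.Chars.lower f.toList) || PySem.Chars.isIn ['_','d','i','v','_'] (PySem.Chars.lower f.toList)) with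
        | true =>
          have hstep : catA_step (PySem.Dict.mk [("tier_1", a1), ("tier_2", a2), ("tier_3", a3), ("tier_4", a4), ("tier_5", a5)]) f = PySem.Dict.mk [("tier_1", a1), ("tier_2", a2), ("tier_3", a3 ++ [f]), ("tier_4", a4), ("tier_5", a5)] := by
            simp [catA_step, PySem.Dict.modify, PySem.Dict.insert, PySem.Dict.getD, PySem.Dict.get?, h1, h2, h3]
          have ht : tier_of f = "tier_3" := by
            simp [tier_of, tier_rules, List.find?, h1, h2, h3]
          rw [hstep, ih]
          simp [ht]
        | false =>
          cases h4 : (PySem.Chars.isIn ['_','l','a','g'] (PySem.Chars.lower f.toList)) with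
          | true =>
            have hstep : catA_step (PySem.Dict.mk [("tier_1", a1), ("tier_2", a2), ("tier_3", a3), ("tier_4", a4), ("tier_5", a5)]) f = PySem.Dict.mk [("tier_1", a1), ("tier_2", a2), ("tier_3", a3), ("tier_4", a4 ++ [f]), ("tier_5", a5)] := by
              simp [catA_step, PySem.Dict.modify, PySem.Dict.insert, PySem.Dict.getD, PySem.Dict.get?, h1, h2, h3, h4]
            have ht : tier_of f = "tier_4" := by
              simp [tier_of, tier_rules, List.find?, h1, h2, h3, h4]
            rw [hstep, ih]
            simp [ht]
          | false =>
            cases h5 : (pvKw5.any fun k => PySem.Chars.isIn k.toList (PySem.Chars.lower f.toList)) with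
            | true =>
              have hstep : catA_step (PySem.Dict.mk [("tier_1", a1), ("tier_2", a2), ("tier_3", a3), ("tier_4", a4), ("tier_5", a5)]) f = PySem.Dict.mk [("tier_1", a1), ("tier_2", a2), ("tier_3", a3), ("tier_4", a4), ("tier_5", a5 ++ [f])] := by
                simp [catA_step, PySem.Dict.modify, PySem.Dict.insert, PySem.Dict.getD, PySem.Dict.get?, h1, h2, h3, h4, h5]
              have ht : tier_of f = "tier_5" := by
                simp [tier_of, tier_rules, List.find?, h1, h2, h3, h4, h5]
              rw [hstep, ih]
              simp [ht]
            | false =>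
              have hstep : catA_step (PySem.Dict.mk [("tier_1", a1), ("tier_2", a2), ("tier_3", a3), ("tier_4", a4), ("tier_5", a5)]) f = PySem.Dict.mk [("tier_1", a1 ++ [f]), ("tier_2", a2), ("tier_3", a3), ("tier_4", a4), ("tier_5", a5)] := by
                simp [catA_step, PySem.Dict.modify, PySem.Dict.insert, PySem.Dict.getD, PySem.Dict.get?, h1, h2, h3, h4, h5]
              have ht : tier_of f = "tier_1" := by
                simp [tier_of, tier_rules, List.find?, h1, h2, h3, h4, h5]
              rw [hstep, ih]
              simp [ht]

-- ===== VERDICT (by name: the statement is the Claim_ definition above) =====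
theorem categorize_features_by_tier_py_spec : Claim_equal_categorize_features_by_tier_py := by
  intro fs _
  unfold Spec_categorize_features_by_tier_py categorize_features_by_tier_py
  rw [show (PySem.Dict.ofList
      ([("tier_1", []), ("tier_2", []), ("tier_3", []), ("tier_4", []), ("tier_5", [])] :
        List (String × List String))) =
    PySem.Dict.mk [("tier_1", []), ("tier_2", []), ("tier_3", []), ("tier_4", []), ("tier_5", [])] from by decide]
  rw [catA_fold]
  simp [categorize_features_by_tier_py_alt, tier_rules, zip_map_filter_fst]
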